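-- pv_equiv track=rewrite | github.com/MrSecrets/TensorTonic-Solutions | random-forest-vote/random-forest-vote.py | random_forest_vote
-- ===== SOURCE A (Python) =====
-- def random_forest_vote(predictions):
--     """
--     Compute the majority vote from multiple tree predictions.
--     """
--     # Write code here
--
--     tree = len(predictions)
--     samples = len(predictions[0])
--     preds = []
--
--     for i in range(samples):
--         votes = {}
--         for t in range(tree):
--             label =  predictions[t][i]
--             if label not in votes:
--                 votes[label] = 1
--             else:
--                 votes[label]+=1
--         winner = max(votes.items(), key=lambda x: (x[1], -x[0]))[0]
--         preds.append(winner)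
--     # max_ = max(votes)
--     # for i, vote in enumerate(votes):
--     #     if vote==max_:
--     #         return i
--     return preds
-- ===== SOURCE B (Python) =====
-- def random_forest_vote(predictions):
--     """
--     Compute the majority vote from multiple tree predictions.
--     """
--     samples = len(predictions[0])
--     preds = []
--     for i in range(samples):
--         col = sorted(predictions[t][i] for t in range(len(predictions)))
--         best = cur = col[0]
--         best_len = cur_len = 0
--         for x in col:
--             if x == cur:
--                 cur_len += 1
--             else:
--                 cur = x
--                 cur_len = 1
--             if cur_len > best_len:
--                 best_len = cur_len
--                 best = cur
--         preds.append(best)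
--     return preds
-- ===== Notes on version B (the rewrite author's own statement) =====
-- stated objective: alternative
-- what changed: Replaces A's per-sample dict vote-accumulation plus max over items with sorting each column and a single run-length scan that keeps the first strictly longest run (same winner: highest count, ties broken by lowest label).
import Mathlib
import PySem

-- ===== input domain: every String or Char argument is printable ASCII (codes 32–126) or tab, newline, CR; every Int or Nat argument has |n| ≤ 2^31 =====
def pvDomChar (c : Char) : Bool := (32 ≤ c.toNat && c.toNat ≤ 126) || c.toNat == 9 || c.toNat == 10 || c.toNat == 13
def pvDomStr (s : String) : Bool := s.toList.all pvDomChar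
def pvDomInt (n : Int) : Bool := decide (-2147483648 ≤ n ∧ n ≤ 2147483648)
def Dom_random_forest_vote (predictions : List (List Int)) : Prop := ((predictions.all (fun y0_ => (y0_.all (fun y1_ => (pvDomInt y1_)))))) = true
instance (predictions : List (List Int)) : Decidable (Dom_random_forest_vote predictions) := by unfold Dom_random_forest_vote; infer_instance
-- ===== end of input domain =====

-- B replaces the dict vote-count + max-over-items with sort-each-column and a first-longest-run scan; equal return values, not claimed faster.

-- ===== PORT A =====
def random_forest_vote (predictions : List (List Int)) : List Int :=
  let tree : Int := predictions.length
  let samples : Int := ((PySem.List.pyGet? predictions 0).getD []).length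
  (PySem.List.pyRange 0 samples 1).foldl (fun preds i =>
    let votes := (PySem.List.pyRange 0 tree 1).foldl (fun (d : PySem.Dict Int Int) t =>
      let label := (PySem.List.pyGet? ((PySem.List.pyGet? predictions t).getD []) i).getD 0
      if d.contains label then d.insert label (d.getD label 0 + 1) else d.insert label 1)
      PySem.Dict.empty
    let winner := ((PySem.List.max2? votes.items (fun x => x.2) (fun x => -x.1)).getD (0, 0)).1
    preds ++ [winner]) []

-- ===== PORT B =====
-- the body of B's inner 'for x in col' loop
def voteStep (s : Int × Int × Int × Int) (x : Int) : Int × Int × Int × Int :=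
  let best := s.1; let bestLen := s.2.1; let cur := s.2.2.1; let curLen := s.2.2.2
  let cur' := if x = cur then cur else x
  let curLen' := if x = cur then curLen + 1 else 1
  if bestLen < curLen' then (cur', curLen', cur', curLen') else (best, bestLen, cur', curLen')

def random_forest_vote_alt (predictions : List (List Int)) : List Int :=
  let samples : Int := ((PySem.List.pyGet? predictions 0).getD []).length
  (PySem.List.pyRange 0 samples 1).foldl (fun preds i =>
    let col := PySem.List.sorted ((PySem.List.pyRange 0 (predictions.length : Int) 1).map
      (fun t => (PySem.List.pyGet? ((PySem.List.pyGet? predictions t).getD []) i).getD 0))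
      (fun x => x) false
    let c0 := (PySem.List.pyGet? col 0).getD 0
    let st := col.foldl voteStep (c0, 0, c0, 0)
    preds ++ [st.1]) []

-- ===== PRECONDITION & SPEC =====
-- Pre_ excludes exactly the inputs on which the Python A raises IndexError: the empty
-- list (predictions[0]) and ragged inputs where some row is shorter than the first row.
def Pre_random_forest_vote (predictions : List (List Int)) : Prop :=
  predictions ≠ [] ∧ ∀ row ∈ predictions, (predictions.headD []).length ≤ row.length
instance (predictions : List (List Int)) : Decidable (Pre_random_forest_vote predictions) := by
  unfold Pre_random_forest_vote; infer_instance
def pvWitness_random_forest_vote : List (List Int) := [[1, 2], [1, 3], [2, 2]]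
def Spec_random_forest_vote (predictions : List (List Int)) (out : List Int) : Prop := out = random_forest_vote_alt predictions
instance (predictions : List (List Int)) (out : List Int) : Decidable (Spec_random_forest_vote predictions out) := by unfold Spec_random_forest_vote; infer_instance

-- ===== CLAIM (what is proved, stated in full; the proofs are below) =====
def Claim_equal_random_forest_vote : Prop := ∀ (predictions : List (List Int)), Dom_random_forest_vote predictions → Pre_random_forest_vote predictions → Spec_random_forest_vote predictions (random_forest_vote predictions)

-- ===== LEMMAS AND PROOFS =====

-- "w is the vote winner of column col": w occurs, and every label has a strictly
-- smaller count or the same count and a larger-or-equal label.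
def IsWin (col : List Int) (w : Int) : Prop :=
  w ∈ col ∧ ∀ l ∈ col,
    (col.count l : Int) < (col.count w : Int) ∨
    ((col.count l : Int) = (col.count w : Int) ∧ w ≤ l)

theorem isWin_unique {col : List Int} {w w' : Int} (h : IsWin col w) (h' : IsWin col w') : w = w' := by
  obtain ⟨hm, hall⟩ := h
  obtain ⟨hm', hall'⟩ := h'
  rcases hall w' hm' with h1 | ⟨h1, h2⟩
  · rcases hall' w hm with h3 | ⟨h3, _⟩ <;> omega
  · rcases hall' w hm with h3 | ⟨_, h4⟩ <;> omega

theorem max2_cons_cons (k1 k2 : Int × Int → Int) (p x : Int × Int) (xs : List (Int × Int)) :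
    PySem.List.max2? (p :: x :: xs) k1 k2 =
    PySem.List.max2?
      ((if (decide (k1 p < k1 x) || !decide (k1 x < k1 p) && decide (k2 p < k2 x)) = true
        then x else p) :: xs) k1 k2 := by
  unfold PySem.List.max2?
  simp only [List.foldl_cons]
  congr 1
  by_cases hc : (decide (k1 p < k1 x) || !decide (k1 x < k1 p) && decide (k2 p < k2 x)) = true
  · simp [hc]
  · simp [hc]

theorem max2_some (k1 k2 : Int × Int → Int) :
    ∀ (xs : List (Int × Int)) (p : Int × Int), ∃ m, PySem.List.max2? (p :: xs) k1 k2 = some m := by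
  intro xs
  induction xs with
  | nil => intro p; exact ⟨p, rfl⟩
  | cons x xs ih =>
    intro p
    rw [max2_cons_cons]
    exact ih _

theorem max2_spec (k1 k2 : Int × Int → Int) :
    ∀ (xs : List (Int × Int)) (p m : Int × Int),
    PySem.List.max2? (p :: xs) k1 k2 = some m →
    (m = p ∨ m ∈ xs) ∧
    (k1 p < k1 m ∨ (k1 p = k1 m ∧ k2 p ≤ k2 m)) ∧
    (∀ y ∈ xs, k1 y < k1 m ∨ (k1 y = k1 m ∧ k2 y ≤ k2 m)) := by
  intro xs
  induction xs with
  | nil =>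
    intro p m h
    have : some p = some m := h
    cases this
    exact ⟨Or.inl rfl, Or.inr ⟨rfl, le_refl _⟩, by simp⟩
  | cons x xs ih =>
    intro p m h
    rw [max2_cons_cons] at h
    by_cases hc : (decide (k1 p < k1 x) || !decide (k1 x < k1 p) && decide (k2 p < k2 x)) = true
    · rw [if_pos hc] at h
      obtain ⟨hmem, hxm, hrest⟩ := ih x m h
      simp only [Bool.or_eq_true, Bool.and_eq_true, Bool.not_eq_true', decide_eq_true_eq,
        decide_eq_false_iff_not] at hc
      have hpm : k1 p < k1 m ∨ (k1 p = k1 m ∧ k2 p ≤ k2 m) := by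
        rcases hc with h1 | ⟨h1, h2⟩ <;> rcases hxm with h3 | ⟨h3, h4⟩
        · left; omega
        · left; omega
        · rcases lt_trichotomy (k1 p) (k1 x) with h5 | h5 | h5
          · left; omega
          · left; omega
          · exact absurd h5 h1
        · rcases lt_trichotomy (k1 p) (k1 x) with h5 | h5 | h5
          · left; omega
          · right; exact ⟨by omega, by omega⟩
          · exact absurd h5 h1
      refine ⟨?_, hpm, ?_⟩
      · rcases hmem with rfl | hm
        · right; exact List.mem_cons_self
        · right; exact List.mem_cons_of_mem _ hm
      · intro y hy
        rcases List.mem_cons.mp hy with rfl | hy'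
        · exact hxm
        · exact hrest y hy'
    · rw [if_neg hc] at h
      obtain ⟨hmem, hpm, hrest⟩ := ih p m h
      simp only [Bool.or_eq_true, Bool.and_eq_true, Bool.not_eq_true', decide_eq_true_eq,
        decide_eq_false_iff_not, not_or, not_and] at hc
      obtain ⟨hc1, hc2⟩ := hc
      refine ⟨?_, hpm, ?_⟩
      · rcases hmem with rfl | hm
        · left; rfl
        · right; exact List.mem_cons_of_mem _ hm
      · intro y hy
        rcases List.mem_cons.mp hy with rfl | hy'
        · by_cases hxp : k1 y < k1 p
          · rcases hpm with h3 | ⟨h3, h4⟩ <;> left <;> omega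
          · have h2 : ¬ k2 p < k2 y := hc2 hxp
            rcases hpm with h3 | ⟨h3, h4⟩
            · left; omega
            · right; exact ⟨by omega, by omega⟩
        · exact hrest y hy'

-- A's inner dict loop is Counter(col)
theorem votes_eq_counter (col : List Int) :
    col.foldl (fun (d : PySem.Dict Int Int) label =>
      if d.contains label then d.insert label (d.getD label 0 + 1) else d.insert label 1)
      PySem.Dict.empty = PySem.Dict.counter col := by
  rw [← PySem.Dict.foldl_insert_getD_add_one_eq_counter]
  congr 1
  funext d x
  by_cases h : d.contains x
  · simp [h]
  · simp only [h, if_neg, Bool.false_eq_true, not_false_iff]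
    rw [PySem.Dict.getD_of_not_contains d 0 (by simpa using h)]
    norm_num

-- A's winner over a nonempty column is the vote winner
theorem A_winner_isWin (col : List Int) (h : col ≠ []) :
    IsWin col ((PySem.List.max2? ((PySem.Dict.counter col).items)
      (fun x => x.2) (fun x => -x.1)).getD (0, 0)).1 := by
  have hitems : (PySem.Dict.counter col).items
      = (PySem.Set.ofList col).map (fun k => (k, (col.count k : Int))) :=
    PySem.Dict.items_counter col
  obtain ⟨c, t, rfl⟩ := List.exists_cons_of_ne_nil h
  have hcmem : c ∈ PySem.Set.ofList (c :: t) := by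
    rw [PySem.Set.mem_ofList]; exact List.mem_cons_self
  obtain ⟨y, ys, hys⟩ : ∃ y ys, (PySem.Dict.counter (c :: t)).items = y :: ys := by
    obtain ⟨z, zs, hz⟩ := List.exists_cons_of_ne_nil
      (l := PySem.Set.ofList (c :: t)) (fun he => by
        rw [he] at hcmem; exact List.not_mem_nil hcmem)
    exact ⟨_, _, by rw [hitems, hz, List.map_cons]⟩
  obtain ⟨m, hm⟩ : ∃ m, PySem.List.max2? ((PySem.Dict.counter (c :: t)).items)
      (fun x => x.2) (fun x => -x.1) = some m := by
    rw [hys]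
    exact max2_some _ _ ys y
  rw [hm]
  simp only [Option.getD_some]
  rw [hys] at hm
  obtain ⟨hmem, hym, hrest⟩ := max2_spec (fun x => x.2) (fun x => -x.1) ys y m hm
  have hall : ∀ p ∈ (PySem.Dict.counter (c :: t)).items,
      p.2 < m.2 ∨ (p.2 = m.2 ∧ -p.1 ≤ -m.1) := by
    intro p hp
    rw [hys] at hp
    rcases List.mem_cons.mp hp with rfl | hp'
    · exact hym
    · exact hrest p hp'
  have hmmem : m ∈ (PySem.Dict.counter (c :: t)).items := by
    rw [hys]
    rcases hmem with rfl | hm'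
    · exact List.mem_cons_self
    · exact List.mem_cons_of_mem _ hm'
  rw [hitems] at hmmem
  obtain ⟨k, hk, hkm⟩ := List.mem_map.mp hmmem
  rw [PySem.Set.mem_ofList] at hk
  constructor
  · rw [← hkm]; exact hk
  · intro l hl
    have hlitems : (l, (List.count l (c :: t) : Int)) ∈ (PySem.Dict.counter (c :: t)).items := by
      rw [hitems]
      exact List.mem_map.mpr ⟨l, (PySem.Set.mem_ofList _ _).mpr hl, rfl⟩
    have := hall _ hlitems
    rw [← hkm] at this ⊢
    simp only at this ⊢
    rcases this with h1 | ⟨h1, h2⟩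
    · left; exact_mod_cast h1
    · right; exact ⟨by exact_mod_cast h1, by omega⟩

-- invariant of B's run scan: over the processed prefix p, (c, cl) is the current
-- run (c is the maximum so far, cl its count) and (b, bl) is the first-best label/count
def ScanInv (p : List Int) (b bl c cl : Int) : Prop :=
  c ∈ p ∧ (∀ l ∈ p, l ≤ c) ∧ cl = (p.count c : Int) ∧
  b ∈ p ∧ bl = (p.count b : Int) ∧ 1 ≤ bl ∧
  ∀ l ∈ p, (p.count l : Int) < bl ∨ ((p.count l : Int) = bl ∧ b ≤ l)

theorem count_append_singleton (p : List Int) (x l : Int) :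
    (p ++ [x]).count l = p.count l + (if l = x then 1 else 0) := by
  rw [List.count_append]
  by_cases h : l = x
  · subst h; simp
  · simp [h, Ne.symm h]

theorem scan_inv :
    ∀ (rest p : List Int) (b bl c cl : Int),
    (p ++ rest).Pairwise (· ≤ ·) → ScanInv p b bl c cl →
    ∃ b' bl' c' cl', List.foldl voteStep (b, bl, c, cl) rest = (b', bl', c', cl') ∧
      ScanInv (p ++ rest) b' bl' c' cl' := by
  intro rest
  induction rest with
  | nil =>
    intro p b bl c cl _ hinv
    exact ⟨b, bl, c, cl, rfl, by simpa using hinv⟩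
  | cons x rest ih =>
    intro p b bl c cl hs hinv
    obtain ⟨hcm, hcmax, hcl, hbm, hbl, hbl1, hbest⟩ := hinv
    have hpair : ∀ a ∈ p, ∀ y ∈ x :: rest, a ≤ y := (List.pairwise_append.mp hs).2.2
    have hcx : c ≤ x := hpair c hcm x List.mem_cons_self
    have hs' : ((p ++ [x]) ++ rest).Pairwise (· ≤ ·) := by
      simpa [List.append_assoc] using hs
    rw [show p ++ x :: rest = (p ++ [x]) ++ rest by simp]
    simp only [List.foldl_cons]
    by_cases hx : x = c
    · -- extend current run
      subst hx
      have hstep : voteStep (b, bl, x, cl) x =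
          if bl < cl + 1 then (x, cl + 1, x, cl + 1) else (b, bl, x, cl + 1) := by
        simp [voteStep]
      have hcount : ∀ l, ((p ++ [x]).count l : Int)
          = (p.count l : Int) + (if l = x then 1 else 0) := by
        intro l; rw [count_append_singleton]; split <;> push_cast <;> ring
      by_cases hup : bl < cl + 1
      · rw [hstep, if_pos hup]
        apply ih (p ++ [x]) x (cl + 1) x (cl + 1) hs'
        refine ⟨by simp, ?_, ?_, by simp, ?_, by omega, ?_⟩
        · intro l hl
          rcases List.mem_append.mp hl with hl' | hl'
          · exact hcmax l hl'
          · simp at hl'; omega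
        · rw [hcount]; simp; omega
        · rw [hcount]; simp; omega
        · intro l hl
          rcases List.mem_append.mp hl with hl' | hl'
          · by_cases hlx : l = x
            · subst hlx
              right
              refine ⟨?_, le_refl _⟩
              rw [hcount, if_pos rfl]
              omega
            · left
              rw [hcount, if_neg hlx]
              have := hbest l hl'
              omega
          · simp at hl'; subst hl'
            right
            refine ⟨?_, le_refl _⟩
            rw [hcount, if_pos rfl]
            omega
      · rw [hstep, if_neg hup]
        have hbx : b ≠ x := by
          intro he; subst he; omega
        apply ih (p ++ [x]) b bl x (cl + 1) hs'
        refine ⟨by simp, ?_, ?_, List.mem_append_left _ hbm, ?_, hbl1, ?_⟩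
        · intro l hl
          rcases List.mem_append.mp hl with hl' | hl'
          · exact hcmax l hl'
          · simp at hl'; omega
        · rw [hcount]; simp; omega
        · rw [hcount, if_neg hbx]; omega
        · intro l hl
          rcases List.mem_append.mp hl with hl' | hl'
          · by_cases hlx : l = x
            · subst hlx
              rw [hcount, if_pos rfl]
              rcases lt_or_eq_of_le (by omega : cl + 1 ≤ bl) with h1 | h1
              · left; omega
              · right; exact ⟨by omega, hcmax b hbm⟩
            · rw [hcount, if_neg hlx]
              have := hbest l hl'
              omega
          · simp at hl'; subst hl'
            rw [hcount, if_pos rfl]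
            rcases lt_or_eq_of_le (by omega : cl + 1 ≤ bl) with h1 | h1
            · left; omega
            · right; exact ⟨by omega, hcmax b hbm⟩
    · -- new, strictly larger label
      have hclt : c < x := lt_of_le_of_ne hcx (fun he => hx he.symm)
      have hxnp : x ∉ p := by
        intro hxp
        exact absurd (le_antisymm (hcmax x hxp) (le_of_lt hclt)) hx
      have hcountx : (p ++ [x]).count x = p.count x + 1 := by
        rw [count_append_singleton, if_pos rfl]
      have hpcx : p.count x = 0 := List.count_eq_zero_of_not_mem hxnp
      have hcount : ∀ l, l ≠ x → (p ++ [x]).count l = p.count l := by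
        intro l hl; rw [count_append_singleton, if_neg hl]; ring
      have hstep : voteStep (b, bl, c, cl) x =
          if bl < 1 then (x, 1, x, 1) else (b, bl, x, 1) := by
        simp [voteStep, hx]
      rw [hstep, if_neg (by omega)]
      apply ih (p ++ [x]) b bl x 1 hs'
      refine ⟨by simp, ?_, ?_, List.mem_append_left _ hbm, ?_, hbl1, ?_⟩
      · intro l hl
        rcases List.mem_append.mp hl with hl' | hl'
        · exact le_of_lt (lt_of_le_of_lt (hcmax l hl') hclt)
        · simp at hl'; omega
      · rw [hcountx, hpcx]; simp
      · have hbx : b ≠ x := fun he => hxnp (he ▸ hbm)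
        rw [hcount b hbx]; exact hbl
      · intro l hl
        rcases List.mem_append.mp hl with hl' | hl'
        · have hlx : l ≠ x := fun he => hxnp (he ▸ hl')
          rw [hcount l hlx]
          exact hbest l hl'
        · simp at hl'; subst hl'
          rw [hcountx, hpcx]
          rcases lt_or_eq_of_le hbl1 with h1 | h1
          · left; push_cast; omega
          · right
            refine ⟨by push_cast; omega, ?_⟩
            exact le_of_lt (lt_of_le_of_lt (hcmax b hbm) hclt)

-- B's scan over a sorted nonempty column yields the vote winner
theorem B_scan_isWin (c : Int) (t : List Int) (hs : (c :: t).Pairwise (· ≤ ·)) :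
    IsWin (c :: t) (List.foldl voteStep (c, 0, c, 0) (c :: t)).1 := by
  have hfirst : voteStep (c, 0, c, 0) c = (c, 1, c, 1) := by
    simp [voteStep]
  have hs1 : ([c] ++ t).Pairwise (· ≤ ·) := by simpa using hs
  have hinv1 : ScanInv [c] c 1 c 1 := by
    refine ⟨List.mem_singleton.mpr rfl, ?_, by simp, List.mem_singleton.mpr rfl, by simp, le_refl _, ?_⟩
    · intro l hl; simp at hl; omega
    · intro l hl; simp at hl; subst hl; right; simp
  obtain ⟨b', bl', c', cl', hfold, hinv⟩ := scan_inv t [c] c 1 c 1 hs1 hinv1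
  have : List.foldl voteStep (c, 0, c, 0) (c :: t) = (b', bl', c', cl') := by
    rw [List.foldl_cons, hfirst, hfold]
  rw [this]
  obtain ⟨_, _, _, hbm, hbl, _, hbest⟩ := hinv
  simp only [List.singleton_append] at hbm hbl hbest
  have hfst : ((b', bl', c', cl') : Int × Int × Int × Int).1 = b' := rfl
  rw [hfst]
  refine ⟨hbm, ?_⟩
  intro l hl
  have h2 := hbest l hl
  rw [← hbl]
  exact h2

-- IsWin transfers along permutations
theorem isWin_of_perm {col col' : List Int} {w : Int} (hp : col.Perm col') (h : IsWin col w) :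
    IsWin col' w := by
  obtain ⟨hm, hall⟩ := h
  refine ⟨hp.mem_iff.mp hm, ?_⟩
  intro l hl
  have := hall l (hp.mem_iff.mpr hl)
  rwa [hp.count_eq l, hp.count_eq w] at this

-- per-column: A's dict winner equals B's scan value
theorem winner_eq (col : List Int) (h : col ≠ []) :
    ((PySem.List.max2? ((col.foldl (fun (d : PySem.Dict Int Int) label =>
        if d.contains label then d.insert label (d.getD label 0 + 1) else d.insert label 1)
        PySem.Dict.empty).items) (fun x => x.2) (fun x => -x.1)).getD (0, 0)).1
    = (List.foldl voteStep
        ((PySem.List.pyGet? (PySem.List.sorted col (fun x => x) false) 0).getD 0, 0,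
         (PySem.List.pyGet? (PySem.List.sorted col (fun x => x) false) 0).getD 0, 0)
        (PySem.List.sorted col (fun x => x) false)).1 := by
  rw [votes_eq_counter]
  have hA := A_winner_isWin col h
  have hperm : (PySem.List.sorted col (fun x => x) false).Perm col :=
    PySem.List.sorted_perm col (fun x => x) false
  have hne : PySem.List.sorted col (fun x => x) false ≠ [] := by
    intro hc
    exact h ((PySem.List.sorted_eq_nil_iff _ _ _).mp hc)
  obtain ⟨c, t, hct⟩ := List.exists_cons_of_ne_nil hne
  have hpw : (c :: t).Pairwise (· ≤ ·) := by
    have := PySem.List.sorted_pairwise col (fun x => x) (κ := Int)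
    rw [hct] at this
    exact this
  have hB := B_scan_isWin c t hpw
  have hBwin : IsWin col (List.foldl voteStep (c, 0, c, 0) (c :: t)).1 :=
    isWin_of_perm (hct ▸ hperm) hB
  rw [hct]
  have hget : (PySem.List.pyGet? (c :: t) 0).getD 0 = c := by
    simp [PySem.List.pyGet?, PySem.List.pyIdx?]
  rw [hget]
  exact isWin_unique hA hBwin

-- ===== VERDICT (by name: the statement is the Claim_ definition above) =====
theorem random_forest_vote_spec : Claim_equal_random_forest_vote := by
  intro predictions _ hpre
  obtain ⟨hne, _⟩ := hpre
  unfold Spec_random_forest_vote random_forest_vote random_forest_vote_alt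
  simp only []
  congr 1
  funext preds i
  congr 1
  have hlen : (1 : Int) ≤ (predictions.length : Int) := by
    have : predictions.length ≠ 0 := fun h0 => hne (List.eq_nil_of_length_eq_zero h0)
    omega
  set col : List Int := (PySem.List.pyRange 0 (predictions.length : Int) 1).map
    (fun t => (PySem.List.pyGet? ((PySem.List.pyGet? predictions t).getD []) i).getD 0) with hcol
  have hcolne : col ≠ [] := by
    rw [hcol]
    intro hc
    have := List.map_eq_nil_iff.mp hc
    rw [PySem.List.pyRange_one_cons (by omega)] at this
    cases this
  have := winner_eq col hcolne
  rw [List.foldl_map] at this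
  rw [hcol] at this
  simpa using this
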